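-- pv_equiv track=rewrite | github.com/osoleve/fold-sft-data | tier0-geometry-geometry/generate_geometry_sft.py | _if_to_cond
-- ===== SOURCE A (Python) =====
-- def _if_to_cond(body: str) -> str:
--     """Convert a top-level (if test then else) to (cond [test then] [else alt])."""
--     stripped = body.strip()
--     if not stripped.startswith("(if "):
--         return body
--
--     i = 4
--     parts: list[str] = []
--     for _ in range(3):
--         while i < len(stripped) and stripped[i].isspace():
--             i += 1
--         if i >= len(stripped):
--             return body
--         start = i
--         if stripped[i] == "(":
--             depth = 0
--             in_str = False
--             esc = False
--             while i < len(stripped):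
--                 c = stripped[i]
--                 if in_str:
--                     if esc:
--                         esc = False
--                     elif c == "\\":
--                         esc = True
--                     elif c == '"':
--                         in_str = False
--                 elif c == '"':
--                     in_str = True
--                 elif c == "(":
--                     depth += 1
--                 elif c == ")":
--                     depth -= 1
--                     if depth == 0:
--                         i += 1
--                         break
--                 i += 1
--             parts.append(stripped[start:i])
--         else:
--             while i < len(stripped) and stripped[i] not in " \t\n\r)":
--                 i += 1
--             parts.append(stripped[start:i])
--
--     if len(parts) != 3:
--         return body
--
--     test, then, els = parts
--     return f"(cond\n      [{test}\n       {then}]\n      [else\n       {els}])"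
-- ===== SOURCE B (Python) =====
-- def _next_token(rest):
--     """Read one top-level s-expression token from a list of remaining chars.
--
--     Returns (token, remaining_chars) or None if only whitespace is left."""
--     while rest and rest[0].isspace():
--         rest = rest[1:]
--     if not rest:
--         return None
--     if rest[0] == "(":
--         tok = []
--         depth = 0
--         mode = 0  # 0 = normal, 1 = inside string, 2 = after backslash in string
--         while rest:
--             c = rest[0]
--             rest = rest[1:]
--             tok.append(c)
--             if mode == 2:
--                 mode = 1
--             elif mode == 1:
--                 if c == "\\":
--                     mode = 2
--                 elif c == '"':
--                     mode = 0
--             elif c == '"':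
--                 mode = 1
--             elif c == "(":
--                 depth += 1
--             elif c == ")":
--                 depth -= 1
--                 if depth == 0:
--                     break
--         return "".join(tok), rest
--     tok = []
--     while rest and rest[0] not in " \t\n\r)":
--         tok.append(rest[0])
--         rest = rest[1:]
--     return "".join(tok), rest
--
--
-- def _if_to_cond(body: str) -> str:
--     """Convert a top-level (if test then else) to (cond [test then] [else alt])."""
--     stripped = body.strip()
--     if not stripped.startswith("(if "):
--         return body
--     rest = list(stripped[4:])
--     parts = []
--     for _ in range(3):
--         got = _next_token(rest)
--         if got is None:
--             return body
--         tok, rest = got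
--         parts.append(tok)
--     test, then, els = parts
--     return f"(cond\n      [{test}\n       {then}]\n      [else\n       {els}])"
-- ===== Notes on version B (the rewrite author's own statement) =====
-- stated objective: idiomatic
-- what changed: A's three inlined index-based scanning loops over the stripped string are replaced by a reusable single-token reader that consumes a list of remaining characters (producer/consumer decomposition, mode-encoded string state, token built incrementally instead of sliced by indices).
import Mathlib
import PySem

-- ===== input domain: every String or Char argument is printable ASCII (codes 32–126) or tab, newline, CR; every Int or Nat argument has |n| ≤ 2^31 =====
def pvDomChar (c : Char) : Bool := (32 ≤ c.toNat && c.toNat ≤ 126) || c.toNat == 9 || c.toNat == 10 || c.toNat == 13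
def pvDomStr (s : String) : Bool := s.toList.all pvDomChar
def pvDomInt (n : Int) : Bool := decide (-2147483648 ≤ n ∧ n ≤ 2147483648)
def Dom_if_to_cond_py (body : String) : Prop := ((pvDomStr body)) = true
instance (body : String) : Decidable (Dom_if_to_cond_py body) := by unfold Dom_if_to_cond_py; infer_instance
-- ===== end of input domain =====

-- B rewrites the three inlined index-based scanning loops of A as one reusable
-- token reader that consumes a list of remaining characters (objective: idiomatic
-- producer/consumer decomposition; same asymptotic cost).

-- ===== PORT A =====
-- A's inner `while` loops, one helper per loop, all index-based over the stripped text.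

-- `while i < len(stripped) and stripped[i].isspace(): i += 1`
def aSkipWs (l : List Char) (i : Nat) : Nat :=
  if h : i < l.length then
    if PySem.Chars.isspace l[i] then aSkipWs l (i + 1) else i
  else i
termination_by l.length - i

-- the balanced-group `while` loop (depth / in_str / esc state machine); returns the final i
def aGroup (l : List Char) (i : Nat) (depth : Int) (instr esc : Bool) : Nat :=
  if h : i < l.length then
    let c := l[i]
    if instr then
      if esc then aGroup l (i + 1) depth instr false
      else if c = '\\' then aGroup l (i + 1) depth instr true
      else if c = '"' then aGroup l (i + 1) depth false esc
      else aGroup l (i + 1) depth instr esc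
    else if c = '"' then aGroup l (i + 1) depth true esc
    else if c = '(' then aGroup l (i + 1) (depth + 1) instr esc
    else if c = ')' then
      if depth - 1 = 0 then i + 1 else aGroup l (i + 1) (depth - 1) instr esc
    else aGroup l (i + 1) depth instr esc
  else i
termination_by l.length - i

-- `while i < len(stripped) and stripped[i] not in " \t\n\r)": i += 1`
def aAtom (l : List Char) (i : Nat) : Nat :=
  if h : i < l.length then
    if l[i] = ' ' ∨ l[i] = '\t' ∨ l[i] = '\n' ∨ l[i] = '\r' ∨ l[i] = ')' then i
    else aAtom l (i + 1)
  else i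
termination_by l.length - i

-- `for _ in range(3)` with state (i, parts); `none` = the early `return body`
def aLoop (l : List Char) (n : Nat) (i : Nat) (parts : List String) : Option (List String) :=
  match n with
  | 0 => some parts
  | n + 1 =>
    let j := aSkipWs l i
    if h : j < l.length then
      let k := if l[j] = '(' then aGroup l j 0 false false else aAtom l j
      -- parts.append(stripped[start:i])
      aLoop l n k (parts ++ [String.ofList (PySem.List.slice l (some (j : Int)) (some (k : Int)))])
    else none

def if_to_cond_py (body : String) : String :=
  let stripped := PySem.Str.strip body
  if ¬ (PySem.Str.startswith stripped "(if ") then body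
  else
    match aLoop stripped.toList 3 4 [] with
    | none => body
    | some parts =>
      if parts.length ≠ 3 then body
      else
        match parts with
        | [test, thn, els] =>
          "(cond\n      [" ++ test ++ "\n       " ++ thn ++ "]\n      [else\n       " ++ els ++ "])"
        | _ => body

-- ===== PORT B =====
-- B's token reader: consumes a list of remaining characters, no indices.

-- `while rest and rest[0].isspace(): rest = rest[1:]`
def bSkipWs : List Char → List Char
  | [] => []
  | c :: rs => if PySem.Chars.isspace c then bSkipWs rs else c :: rs

-- balanced group scanner; mode: 0 = normal, 1 = in string, 2 = after backslash
def bGroup (rest : List Char) (tok : List Char) (depth : Int) (mode : Nat) :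
    List Char × List Char :=
  match rest with
  | [] => (tok, [])
  | c :: rs =>
    let tok := tok ++ [c]
    if mode = 2 then bGroup rs tok depth 1
    else if mode = 1 then
      if c = '\\' then bGroup rs tok depth 2
      else if c = '"' then bGroup rs tok depth 0
      else bGroup rs tok depth 1
    else if c = '"' then bGroup rs tok depth 1
    else if c = '(' then bGroup rs tok (depth + 1) mode
    else if c = ')' then
      if depth - 1 = 0 then (tok, rs) else bGroup rs tok (depth - 1) mode
    else bGroup rs tok depth mode

-- atom scanner
def bAtom : List Char → List Char → List Char × List Char
  | [], tok => (tok, [])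
  | c :: rs, tok =>
    if c = ' ' ∨ c = '\t' ∨ c = '\n' ∨ c = '\r' ∨ c = ')' then (tok, c :: rs)
    else bAtom rs (tok ++ [c])

-- `_next_token`: one top-level s-expression token, or none if only whitespace is left
def bNextToken (rest : List Char) : Option (String × List Char) :=
  match bSkipWs rest with
  | [] => none
  | c :: rs =>
    if c = '(' then
      let p := bGroup (c :: rs) [] 0 0
      some (String.ofList p.1, p.2)
    else
      let p := bAtom (c :: rs) []
      some (String.ofList p.1, p.2)

def if_to_cond_py_alt (body : String) : String :=
  let stripped := PySem.Str.strip body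
  if ¬ (PySem.Str.startswith stripped "(if ") then body
  else
    match bNextToken (stripped.toList.drop 4) with
    | none => body
    | some (test, r1) =>
      match bNextToken r1 with
      | none => body
      | some (thn, r2) =>
        match bNextToken r2 with
        | none => body
        | some (els, _) =>
          "(cond\n      [" ++ test ++ "\n       " ++ thn ++ "]\n      [else\n       " ++ els ++ "])"

-- ===== PRECONDITION & SPEC =====
def Spec_if_to_cond_py (body : String) (out : String) : Prop := out = if_to_cond_py_alt body
instance (body : String) (out : String) : Decidable (Spec_if_to_cond_py body out) := by unfold Spec_if_to_cond_py; infer_instance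

-- ===== CLAIM (what is proved, stated in full; the proofs are below) =====
def Claim_equal_if_to_cond_py : Prop := ∀ (body : String), Dom_if_to_cond_py body → Spec_if_to_cond_py body (if_to_cond_py body)

-- ===== LEMMAS AND PROOFS =====

lemma skip_drop (l : List Char) (i : Nat) :
    bSkipWs (l.drop i) = l.drop (aSkipWs l i) := by
  fun_induction aSkipWs l i with
  | case1 i h hsp ih =>
    rw [List.drop_eq_getElem_cons h]
    simp [bSkipWs, hsp, ih]
  | case2 i h hsp =>
    rw [List.drop_eq_getElem_cons h]
    simp [bSkipWs, hsp]
  | case3 i h =>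
    rw [List.drop_eq_nil_of_le (by omega)]
    simp [bSkipWs]

lemma aGroup_ge (l : List Char) (i : Nat) (depth : Int) (instr esc : Bool) :
    i ≤ aGroup l i depth instr esc := by
  fun_induction aGroup l i depth instr esc <;> omega

lemma aGroup_le_len (l : List Char) (i : Nat) (depth : Int) (instr esc : Bool)
    (hi : i ≤ l.length) : aGroup l i depth instr esc ≤ l.length := by
  fun_induction aGroup l i depth instr esc with
  | case7 => omega
  | case10 i depth instr esc h => omega
  | _ => rename_i ih; exact ih (by omega)

lemma aAtom_ge (l : List Char) (i : Nat) : i ≤ aAtom l i := by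
  fun_induction aAtom l i <;> omega

lemma aAtom_le_len (l : List Char) (i : Nat) (hi : i ≤ l.length) : aAtom l i ≤ l.length := by
  fun_induction aAtom l i with
  | case1 i h hstop => omega
  | case2 i h hstop ih => exact ih (by omega)
  | case3 i h => omega

-- peeling one consumed character off a slice of the remaining input
lemma step_take (l : List Char) (i k : Nat) (h : i < l.length) (hik : i + 1 ≤ k)
    (tok : List Char) :
    tok ++ (l.drop i).take (k - i) = (tok ++ [l[i]]) ++ (l.drop (i + 1)).take (k - (i + 1)) := by
  rw [List.drop_eq_getElem_cons h, show k - i = (k - (i + 1)) + 1 by omega,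
    List.take_succ_cons, List.append_assoc]
  rfl

lemma group_eq (l : List Char) (i : Nat) (depth : Int) (instr esc : Bool) :
    ∀ (m : Nat) (tok : List Char),
      ((m = 0 ∧ instr = false ∧ esc = false) ∨ (m = 1 ∧ instr = true ∧ esc = false) ∨
        (m = 2 ∧ instr = true ∧ esc = true)) →
      bGroup (l.drop i) tok depth m =
        (tok ++ (l.drop i).take (aGroup l i depth instr esc - i),
          l.drop (aGroup l i depth instr esc)) := by
  fun_induction aGroup l i depth instr esc with
  | case1 i depth h ih =>
    intro m tok rel
    rcases rel with ⟨hm, hinstr, hesc⟩ | ⟨hm, hinstr, hesc⟩ | ⟨hm, hinstr, hesc⟩ <;>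
      (try simp at hinstr hesc) <;> subst hm
    rw [step_take l i _ h (by have := aGroup_ge l (i + 1) depth true false; omega) tok,
      List.drop_eq_getElem_cons h]
    simpa [bGroup] using ih 1 (tok ++ [l[i]]) (by simp)
  | case2 i depth esc h c hesc hc ih =>
    intro m tok rel
    rcases rel with ⟨hm, hinstr, hesc'⟩ | ⟨hm, hinstr, hesc'⟩ | ⟨hm, hinstr, hesc'⟩ <;>
      (try simp at hinstr) <;> (try exact absurd hesc' hesc) <;> subst hm
    rw [step_take l i _ h (by have := aGroup_ge l (i + 1) depth true true; omega) tok,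
      List.drop_eq_getElem_cons h]
    have hx : l[i] = '\\' := hc
    simpa [bGroup, hx] using ih 2 (tok ++ [l[i]]) (by simp)
  | case3 i depth esc h c hesc hc1 hc2 ih =>
    intro m tok rel
    rcases rel with ⟨hm, hinstr, hesc'⟩ | ⟨hm, hinstr, hesc'⟩ | ⟨hm, hinstr, hesc'⟩ <;>
      (try simp at hinstr) <;> (try exact absurd hesc' hesc) <;> subst hm
    subst hesc'
    rw [step_take l i _ h (by have := aGroup_ge l (i + 1) depth false false; omega) tok,
      List.drop_eq_getElem_cons h]
    have hx1 : ¬ l[i] = '\\' := hc1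
    have hx2 : l[i] = '"' := hc2
    simpa [bGroup, hx1, hx2] using ih 0 (tok ++ [l[i]]) (by simp)
  | case4 i depth esc h c hesc hc1 hc2 ih =>
    intro m tok rel
    rcases rel with ⟨hm, hinstr, hesc'⟩ | ⟨hm, hinstr, hesc'⟩ | ⟨hm, hinstr, hesc'⟩ <;>
      (try simp at hinstr) <;> (try exact absurd hesc' hesc) <;> subst hm
    subst hesc'
    rw [step_take l i _ h (by have := aGroup_ge l (i + 1) depth true false; omega) tok,
      List.drop_eq_getElem_cons h]
    have hx1 : ¬ l[i] = '\\' := hc1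
    have hx2 : ¬ l[i] = '"' := hc2
    simpa [bGroup, hx1, hx2] using ih 1 (tok ++ [l[i]]) (by simp)
  | case5 i depth instr esc h c hinstr hc ih =>
    intro m tok rel
    rcases rel with ⟨hm, hinstr', hesc'⟩ | ⟨hm, hinstr', hesc'⟩ | ⟨hm, hinstr', hesc'⟩ <;>
      (try exact absurd hinstr' hinstr) <;> subst hm
    subst hinstr'; subst hesc'
    rw [step_take l i _ h (by have := aGroup_ge l (i + 1) depth true false; omega) tok,
      List.drop_eq_getElem_cons h]
    have hx : l[i] = '"' := hc
    simpa [bGroup, hx] using ih 1 (tok ++ [l[i]]) (by simp)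
  | case6 i depth instr esc h c hinstr hc1 hc2 ih =>
    intro m tok rel
    rcases rel with ⟨hm, hinstr', hesc'⟩ | ⟨hm, hinstr', hesc'⟩ | ⟨hm, hinstr', hesc'⟩ <;>
      (try exact absurd hinstr' hinstr) <;> subst hm
    subst hinstr'; subst hesc'
    rw [step_take l i _ h
      (by have := aGroup_ge l (i + 1) (depth + 1) false false; omega) tok,
      List.drop_eq_getElem_cons h]
    have hx1 : ¬ l[i] = '"' := hc1
    have hx2 : l[i] = '(' := hc2
    simpa [bGroup, hx1, hx2] using ih 0 (tok ++ [l[i]]) (by simp)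
  | case7 i depth instr esc h c hinstr hc1 hc2 hc3 hd =>
    intro m tok rel
    rcases rel with ⟨hm, hinstr', hesc'⟩ | ⟨hm, hinstr', hesc'⟩ | ⟨hm, hinstr', hesc'⟩ <;>
      (try exact absurd hinstr' hinstr) <;> subst hm
    subst hinstr'; subst hesc'
    rw [List.drop_eq_getElem_cons h]
    have hx1 : ¬ l[i] = '"' := hc1
    have hx2 : ¬ l[i] = '(' := hc2
    have hx3 : l[i] = ')' := hc3
    simp [bGroup, hx3, hd, List.take_succ_cons]
  | case8 i depth instr esc h c hinstr hc1 hc2 hc3 hd ih =>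
    intro m tok rel
    rcases rel with ⟨hm, hinstr', hesc'⟩ | ⟨hm, hinstr', hesc'⟩ | ⟨hm, hinstr', hesc'⟩ <;>
      (try exact absurd hinstr' hinstr) <;> subst hm
    subst hinstr'; subst hesc'
    rw [step_take l i _ h
      (by have := aGroup_ge l (i + 1) (depth - 1) false false; omega) tok,
      List.drop_eq_getElem_cons h]
    have hx1 : ¬ l[i] = '"' := hc1
    have hx2 : ¬ l[i] = '(' := hc2
    have hx3 : l[i] = ')' := hc3
    simpa [bGroup, hx1, hx2, hx3, hd] using ih 0 (tok ++ [l[i]]) (by simp)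
  | case9 i depth instr esc h c hinstr hc1 hc2 hc3 ih =>
    intro m tok rel
    rcases rel with ⟨hm, hinstr', hesc'⟩ | ⟨hm, hinstr', hesc'⟩ | ⟨hm, hinstr', hesc'⟩ <;>
      (try exact absurd hinstr' hinstr) <;> subst hm
    subst hinstr'; subst hesc'
    rw [step_take l i _ h (by have := aGroup_ge l (i + 1) depth false false; omega) tok,
      List.drop_eq_getElem_cons h]
    have hx1 : ¬ l[i] = '"' := hc1
    have hx2 : ¬ l[i] = '(' := hc2
    have hx3 : ¬ l[i] = ')' := hc3
    simpa [bGroup, hx1, hx2, hx3] using ih 0 (tok ++ [l[i]]) (by simp)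
  | case10 i depth instr esc h =>
    intro m tok rel
    rw [List.drop_eq_nil_of_le (by omega)]
    simp [bGroup]

lemma atom_eq (l : List Char) (i : Nat) :
    ∀ (tok : List Char),
      bAtom (l.drop i) tok = (tok ++ (l.drop i).take (aAtom l i - i), l.drop (aAtom l i)) := by
  fun_induction aAtom l i with
  | case1 i h hstop =>
    intro tok
    rw [List.drop_eq_getElem_cons h]
    simp [bAtom, hstop, ← List.drop_eq_getElem_cons h]
  | case2 i h hstop ih =>
    intro tok
    rw [step_take l i _ h (by have := aAtom_ge l (i + 1); omega) tok,
      List.drop_eq_getElem_cons h]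
    simpa [bAtom, hstop] using ih (tok ++ [l[i]])
  | case3 i h =>
    intro tok
    rw [List.drop_eq_nil_of_le (by omega)]
    simp [bAtom]

lemma next_eq (l : List Char) (i : Nat) :
    bNextToken (l.drop i) =
      if h : aSkipWs l i < l.length then
        some (String.ofList ((l.drop (aSkipWs l i)).take
            ((if l[aSkipWs l i] = '(' then aGroup l (aSkipWs l i) 0 false false
              else aAtom l (aSkipWs l i)) - aSkipWs l i)),
          l.drop (if l[aSkipWs l i] = '(' then aGroup l (aSkipWs l i) 0 false false
            else aAtom l (aSkipWs l i)))
      else none := by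
  rw [bNextToken, skip_drop]
  by_cases h : aSkipWs l i < l.length
  · rw [List.drop_eq_getElem_cons h]
    by_cases hc : l[aSkipWs l i] = '('
    · have hg := group_eq l (aSkipWs l i) 0 false false 0 [] (by simp)
      rw [List.drop_eq_getElem_cons h, hc] at hg
      simp [h, hc, hg]
    · have ha := atom_eq l (aSkipWs l i) []
      simp [h, hc, ha]
  · rw [List.drop_eq_nil_of_le (by omega)]
    simp [h]

-- one token step of A's loop keeps the index within the text
lemma step_le_len (l : List Char) (j : Nat) (hj : j < l.length) :
    (if l[j] = '(' then aGroup l j 0 false false else aAtom l j) ≤ l.length := by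
  by_cases hc : l[j] = '(' <;>
    simp [hc, aGroup_le_len l j 0 false false (by omega), aAtom_le_len l j (by omega)]

lemma aLoop_succ (l : List Char) (n i : Nat) (parts : List String) :
    aLoop l (n + 1) i parts =
      (let j := aSkipWs l i
       if h : j < l.length then
         let k := if l[j] = '(' then aGroup l j 0 false false else aAtom l j
         aLoop l n k (parts ++ [String.ofList (PySem.List.slice l (some (j : Int)) (some (k : Int)))])
       else none) := rfl

-- ===== VERDICT (by name: the statement is the Claim_ definition above) =====
theorem if_to_cond_py_spec : Claim_equal_if_to_cond_py := by
  intro body _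
  unfold Spec_if_to_cond_py if_to_cond_py if_to_cond_py_alt
  simp only [PySem.Str.startswith_eq, PySem.Str.toList_strip,
    show "(if ".toList = ['(', 'i', 'f', ' '] from rfl]
  by_cases hs : PySem.Chars.startswith (PySem.Chars.strip body.toList) ['(', 'i', 'f', ' '] = true
  case neg => simp [hs]
  case pos =>
  set l : List Char := PySem.Chars.strip body.toList with hl
  have h4 : 4 ≤ l.length := by
    have hp := (PySem.Chars.startswith_iff l ['(', 'i', 'f', ' ']).mp hs
    simpa using hp.length_le
  rw [if_neg (by simp [hs]), if_neg (by simp [hs])]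
  rw [next_eq l 4, show (3 : Nat) = 2 + 1 from rfl, aLoop_succ]
  set j1 := aSkipWs l 4 with hj1
  by_cases h1 : j1 < l.length
  case neg => simp [h1]
  case pos =>
  set k1 := (if l[j1] = '(' then aGroup l j1 0 false false else aAtom l j1) with hk1
  have hk1le : k1 ≤ l.length := step_le_len l j1 h1
  simp only [dif_pos h1]
  rw [next_eq l k1, show (2 : Nat) = 1 + 1 from rfl, aLoop_succ]
  set j2 := aSkipWs l k1 with hj2
  by_cases h2 : j2 < l.length
  case neg => simp [h2]
  case pos =>
  set k2 := (if l[j2] = '(' then aGroup l j2 0 false false else aAtom l j2) with hk2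
  have hk2le : k2 ≤ l.length := step_le_len l j2 h2
  simp only [dif_pos h2]
  rw [next_eq l k2, show (1 : Nat) = 0 + 1 from rfl, aLoop_succ]
  set j3 := aSkipWs l k2 with hj3
  by_cases h3 : j3 < l.length
  case neg => simp [h3]
  case pos =>
  have hsl : ∀ (c : Prop) (inst : Decidable c) (x y j : Nat),
      PySem.List.slice l (some (j : Int)) (some (if c then (x : Int) else (y : Int))) =
        List.take ((if c then x else y) - j) (List.drop j l) := by
    intro c inst x y j
    split <;> simp [PySem.List.slice_natCast]
  simp [dif_pos h3, aLoop, hsl]
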